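-- pv_equiv track=rewrite | github.com/DNAi-inc/DNHealth | src/dnhealth/dnhealth_fhir/patch.py | validate_json_patch_operations
-- ===== SOURCE A (Python) =====
-- from typing import Dict, List, Optional, Any, Union, Tuple
--
-- def validate_json_patch_operations(patch_operations: List[Dict[str, Any]]) -> List[str]:
--     """
--     Validate JSON Patch operations.
--
--     Args:
--         patch_operations: List of patch operations
--
--     Returns:
--         List of validation error messages (empty if valid)
--     """
--     errors = []
--
--     valid_ops = {"add", "remove", "replace", "move", "copy", "test"}
--
--     for i, op in enumerate(patch_operations):
--         if not isinstance(op, dict):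
--             errors.append(f"Operation {i}: Must be a dictionary")
--             continue
--
--         op_type = op.get("op")
--         if not op_type:
--             errors.append(f"Operation {i}: Missing 'op' field")
--             continue
--
--         if op_type not in valid_ops:
--             errors.append(f"Operation {i}: Invalid operation type '{op_type}'")
--             continue
--
--         path = op.get("path")
--         if not path:
--             errors.append(f"Operation {i}: Missing 'path' field")
--             continue
--
--         # Validate path format
--         if not path.startswith("/"):
--             errors.append(f"Operation {i}: Path must start with '/'")
--
--         # Validate required fields based on operation type
--         if op_type in {"add", "replace"}:
--             if "value" not in op:
--                 errors.append(f"Operation {i}: '{op_type}' requires 'value' field")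
--
--         if op_type in {"move", "copy"}:
--             if "from" not in op:
--                 errors.append(f"Operation {i}: '{op_type}' requires 'from' field")
--
--         if op_type == "test":
--             if "value" not in op:
--                 errors.append(f"Operation {i}: 'test' requires 'value' field")
--
--     return errors
-- ===== SOURCE B (Python) =====
-- VALID = {"add", "remove", "replace", "move", "copy", "test"}
-- REQUIRED = {
--     "add": ["value"],
--     "remove": [],
--     "replace": ["value"],
--     "move": ["from"],
--     "copy": ["from"],
--     "test": ["value"],
-- }
--
--
-- def _gate_error(i, op):
--     """First failing structural check for one operation, or None if it passes."""
--     if not isinstance(op, dict):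
--         return f"Operation {i}: Must be a dictionary"
--     if not op.get("op"):
--         return f"Operation {i}: Missing 'op' field"
--     if op.get("op") not in VALID:
--         return f"Operation {i}: Invalid operation type '{op.get('op')}'"
--     if not op.get("path"):
--         return f"Operation {i}: Missing 'path' field"
--     return None
--
--
-- def validate_json_patch_operations(patch_operations):
--     # Pass 1: gating structural errors (one per operation, or None).
--     gates = [_gate_error(i, op) for i, op in enumerate(patch_operations)]
--     # Pass 2: path-format errors for operations that passed the gate.
--     slashes = [None if g is not None or op.get("path").startswith("/")
--                else f"Operation {i}: Path must start with '/'"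
--                for (i, op), g in zip(enumerate(patch_operations), gates)]
--     # Pass 3: missing required fields for operations that passed the gate.
--     missing = [[] if g is not None else
--                [f"Operation {i}: '{op.get('op')}' requires '{f}' field"
--                 for f in REQUIRED[op.get("op")] if f not in op]
--                for (i, op), g in zip(enumerate(patch_operations), gates)]
--     # Merge the three passes, in index order.
--     out = []
--     for g, s, m in zip(gates, slashes, missing):
--         if g is not None:
--             out.append(g)
--         else:
--             if s is not None:
--                 out.append(s)
--             out.extend(m)
--     return out
-- ===== Notes on version B (the rewrite author's own statement) =====
-- stated objective: alternative
-- what changed: Replaced A's single loop with per-op-type if-blocks and append/continue accumulator by three staged full passes (a gating pass of structural checks, a path-format pass, and a table-driven missing-required-field pass) whose per-index results are merged at the end.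
import Mathlib
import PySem

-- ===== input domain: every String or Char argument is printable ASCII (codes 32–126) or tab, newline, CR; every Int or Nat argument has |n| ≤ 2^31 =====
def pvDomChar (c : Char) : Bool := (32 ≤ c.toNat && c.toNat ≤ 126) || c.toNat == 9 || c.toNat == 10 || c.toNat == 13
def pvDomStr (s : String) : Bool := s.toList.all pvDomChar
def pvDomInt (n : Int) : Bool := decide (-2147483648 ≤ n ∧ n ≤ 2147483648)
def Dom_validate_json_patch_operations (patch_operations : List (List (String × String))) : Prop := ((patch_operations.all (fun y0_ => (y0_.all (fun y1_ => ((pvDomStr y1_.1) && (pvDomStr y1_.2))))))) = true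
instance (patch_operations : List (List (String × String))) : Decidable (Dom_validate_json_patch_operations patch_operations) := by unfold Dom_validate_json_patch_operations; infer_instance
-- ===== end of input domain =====

-- B validates in three staged full passes (gating structural errors, then path-format
-- errors, then missing-required-field errors) merged per index, instead of A's single
-- loop with per-op-type branches and continue (objective: alternative).
-- Under the type convention each operation is a string-keyed, string-valued dict, so
-- isinstance(op, dict) is always true and path.startswith never raises: total.

-- shared primitive: Python dict.get on the association-list representation (first match)
def pvGet? (op : List (String × String)) (k : String) : Option String :=
  (op.find? (fun p => p.1 == k)).map (·.2)

-- ===== PORT A =====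
-- one iteration of A's loop: each 'append; continue' branch returns at once
def pvAStep (errors : List String) (i : Int) (op : List (String × String)) : List String :=
  -- 'if not isinstance(op, dict)': always false here (op is a dict by type)
  match pvGet? op "op" with
  | none => errors ++ ["Operation " ++ PySem.Int.toStr i ++ ": Missing 'op' field"]
  | some op_type =>
    if op_type = "" then errors ++ ["Operation " ++ PySem.Int.toStr i ++ ": Missing 'op' field"]
    else if ¬(op_type = "add" ∨ op_type = "remove" ∨ op_type = "replace" ∨ op_type = "move" ∨ op_type = "copy" ∨ op_type = "test") then
      errors ++ ["Operation " ++ PySem.Int.toStr i ++ ": Invalid operation type '" ++ op_type ++ "'"]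
    else
      match pvGet? op "path" with
      | none => errors ++ ["Operation " ++ PySem.Int.toStr i ++ ": Missing 'path' field"]
      | some path =>
        if path = "" then errors ++ ["Operation " ++ PySem.Int.toStr i ++ ": Missing 'path' field"]
        else
          let errors1 := if PySem.Str.startswith path "/" then errors
            else errors ++ ["Operation " ++ PySem.Int.toStr i ++ ": Path must start with '/'"]
          let errors2 := if (op_type = "add" ∨ op_type = "replace") ∧ (pvGet? op "value").isNone then
              errors1 ++ ["Operation " ++ PySem.Int.toStr i ++ ": '" ++ op_type ++ "' requires 'value' field"]
            else errors1
          let errors3 := if (op_type = "move" ∨ op_type = "copy") ∧ (pvGet? op "from").isNone then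
              errors2 ++ ["Operation " ++ PySem.Int.toStr i ++ ": '" ++ op_type ++ "' requires 'from' field"]
            else errors2
          if op_type = "test" ∧ (pvGet? op "value").isNone then
            errors3 ++ ["Operation " ++ PySem.Int.toStr i ++ ": 'test' requires 'value' field"]
          else errors3

def validate_json_patch_operations (patch_operations : List (List (String × String))) : List String :=
  (PySem.List.enumerate patch_operations).foldl (fun errors p => pvAStep errors p.1 p.2) []

-- ===== PORT B =====
-- the REQUIRED table: mandatory extra fields per operation type
def pvRequired? (op_type : String) : Option (List String) :=
  PySem.Dict.get? (PySem.Dict.ofList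
    [("add", ["value"]), ("remove", ([] : List String)), ("replace", ["value"]),
     ("move", ["from"]), ("copy", ["from"]), ("test", ["value"])]) op_type

-- pass 1: _gate_error — first failing structural check, or none
def pvGateErr (i : Int) (op : List (String × String)) : Option String :=
  -- 'if not isinstance(op, dict)': always false here (op is a dict by type)
  match pvGet? op "op" with
  | none => some ("Operation " ++ PySem.Int.toStr i ++ ": Missing 'op' field")
  | some op_type =>
    if op_type = "" then some ("Operation " ++ PySem.Int.toStr i ++ ": Missing 'op' field")
    else if (["add", "remove", "replace", "move", "copy", "test"].contains op_type) = false then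
      some ("Operation " ++ PySem.Int.toStr i ++ ": Invalid operation type '" ++ op_type ++ "'")
    else
      match pvGet? op "path" with
      | none => some ("Operation " ++ PySem.Int.toStr i ++ ": Missing 'path' field")
      | some path =>
        if path = "" then some ("Operation " ++ PySem.Int.toStr i ++ ": Missing 'path' field")
        else none

-- pass 2: path-format error, only for operations whose gate is None
def pvSlashErr (i : Int) (op : List (String × String)) (g : Option String) : Option String :=
  if g.isSome then none
  else match pvGet? op "path" with
    | none => none  -- unreachable: g = none implies 'path' is present and nonempty
    | some path =>
      if PySem.Str.startswith path "/" then none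
      else some ("Operation " ++ PySem.Int.toStr i ++ ": Path must start with '/'")

-- pass 3: missing required fields, only for operations whose gate is None
def pvMissingErrs (i : Int) (op : List (String × String)) (g : Option String) : List String :=
  if g.isSome then []
  else match pvGet? op "op" with
    | none => []  -- unreachable: g = none implies a valid 'op' value
    | some op_type =>
      match pvRequired? op_type with
      | none => []  -- unreachable: g = none implies op_type is a valid key
      | some fields =>
        (fields.filter (fun f => (pvGet? op f).isNone)).map
          (fun f => "Operation " ++ PySem.Int.toStr i ++ ": '" ++ op_type ++ "' requires '" ++ f ++ "' field")

-- merge of one zip(gates, slashes, missing) iteration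
def pvMergeOne (g s : Option String) (m : List String) : List String :=
  match g with
  | some e => [e]
  | none => (match s with | some e => [e] | none => []) ++ m

-- the final merge loop over zip(gates, slashes, missing)
def pvMerge : List (Option String) → List (Option String) → List (List String) → List String
  | g :: gs, s :: ss, m :: ms => pvMergeOne g s m ++ pvMerge gs ss ms
  | _, _, _ => []

def validate_json_patch_operations_alt (patch_operations : List (List (String × String))) : List String :=
  let en := PySem.List.enumerate patch_operations
  let gates := en.map (fun p => pvGateErr p.1 p.2)
  let slashes := (en.zip gates).map (fun q => pvSlashErr q.1.1 q.1.2 q.2)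
  let missing := (en.zip gates).map (fun q => pvMissingErrs q.1.1 q.1.2 q.2)
  pvMerge gates slashes missing

-- ===== PRECONDITION & SPEC =====
def Spec_validate_json_patch_operations (patch_operations : List (List (String × String))) (out : List String) : Prop := out = validate_json_patch_operations_alt patch_operations
instance (patch_operations : List (List (String × String))) (out : List String) : Decidable (Spec_validate_json_patch_operations patch_operations out) := by unfold Spec_validate_json_patch_operations; infer_instance

-- ===== CLAIM (what is proved, stated in full; the proofs are below) =====
def Claim_equal_validate_json_patch_operations : Prop := ∀ (patch_operations : List (List (String × String))), Dom_validate_json_patch_operations patch_operations → Spec_validate_json_patch_operations patch_operations (validate_json_patch_operations patch_operations)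

-- ===== LEMMAS AND PROOFS =====

lemma pvRequired?_eq (t : String) : pvRequired? t =
    if t = "add" then some ["value"] else if t = "remove" then some [] else
    if t = "replace" then some ["value"] else if t = "move" then some ["from"] else
    if t = "copy" then some ["from"] else if t = "test" then some ["value"] else none := by
  have h : PySem.Dict.ofList
      [("add", ["value"]), ("remove", ([] : List String)), ("replace", ["value"]),
       ("move", ["from"]), ("copy", ["from"]), ("test", ["value"])] =
      PySem.Dict.mk
      [("add", ["value"]), ("remove", ([] : List String)), ("replace", ["value"]),
       ("move", ["from"]), ("copy", ["from"]), ("test", ["value"])] := by decide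
  rw [pvRequired?, h]
  simp only [PySem.Dict.get?_mk_cons]
  split_ifs <;> simp_all [PySem.Dict.get?]

lemma zip_map_self {α β : Type} (l : List α) (f : α → β) :
    l.zip (l.map f) = l.map (fun x => (x, f x)) := by
  induction l with
  | nil => rfl
  | cons a t ih => simp [ih]

lemma pvMerge_maps {α : Type} (l : List α) (f g : α → Option String) (h : α → List String) :
    pvMerge (l.map f) (l.map g) (l.map h) =
      l.flatMap (fun x => pvMergeOne (f x) (g x) (h x)) := by
  induction l with
  | nil => rfl
  | cons a t ih => simp [pvMerge, ih]

lemma pvAStep_eq (errors : List String) (i : Int) (op : List (String × String)) :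
    pvAStep errors i op =
      errors ++ pvMergeOne (pvGateErr i op)
        (pvSlashErr i op (pvGateErr i op)) (pvMissingErrs i op (pvGateErr i op)) := by
  unfold pvAStep pvGateErr pvSlashErr pvMissingErrs pvMergeOne
  cases hop : pvGet? op "op" with
  | none => simp
  | some op_type =>
    by_cases h0 : op_type = ""
    · simp [h0]
    · simp only [h0, if_false]
      by_cases hv : op_type = "add" ∨ op_type = "remove" ∨ op_type = "replace" ∨
          op_type = "move" ∨ op_type = "copy" ∨ op_type = "test"
      · have hc : (["add", "remove", "replace", "move", "copy", "test"].contains op_type) = true := by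
          rcases hv with h | h | h | h | h | h <;> subst h <;> decide
        rcases hv with h | h | h | h | h | h <;> subst h <;>
          simp only [String.reduceEq, hc, if_true, if_false, Bool.true_eq_false, pvRequired?_eq] <;>
          cases hp : pvGet? op "path" <;> cases hval : pvGet? op "value" <;>
          cases hfr : pvGet? op "from" <;> simp_all [List.filter] <;>
          split_ifs <;> simp_all [String.append_assoc]
      · push Not at hv
        obtain ⟨h1, h2, h3, h4, h5, h6⟩ := hv
        have hc : (["add", "remove", "replace", "move", "copy", "test"].contains op_type) = false := by
          simp [h1, h2, h3, h4, h5, h6]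
        simp [h1, h2, h3, h4, h5, h6]

-- ===== VERDICT (by name: the statement is the Claim_ definition above) =====
theorem validate_json_patch_operations_spec : Claim_equal_validate_json_patch_operations := by
  intro ps _
  unfold Spec_validate_json_patch_operations validate_json_patch_operations validate_json_patch_operations_alt
  simp only [pvAStep_eq, zip_map_self, List.map_map, Function.comp, pvMerge_maps]
  rw [PySem.List.foldl_append_eq_flatMap]
  simp
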